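-- pv_equiv track=rewrite | github.com/alexander-travov/algo | InterviewBit/BinarySearch/PainterPartitionProblem.py | find_min_paint_time
-- ===== SOURCE A (Python) =====
-- def partition_possible(boards, k, max_len):
--     s = 0
--     num_chunks = 1
--     for i, el in enumerate(boards):
--         if el > max_len:
--             return False
--         s += el
--         if s > max_len:
--             num_chunks += 1
--             if num_chunks > k:
--                 return False
--             s = el
--     return True
--
-- def find_min_paint_time(boards, k, t, m=10000003):
--     low = 1
--     high = sum(boards)
--     res = -1
--
--     while low <= high:
--         mid = low + (high-low)//2
--         if partition_possible(boards, k, mid):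
--             res = mid
--             high = mid - 1
--         else:
--             low = mid + 1
--
--     if res > 0:
--         return res*t % m
--     return -1
-- ===== SOURCE B (Python) =====
-- def find_min_paint_time(boards, k, t, m=10000003):
--     n = len(boards)
--     prefix = [0]
--     s = 0
--     for length in boards:
--         s += length
--         prefix.append(s)
--     dp = prefix[:]                # one painter: each prefix is a single block
--     for _ in range(min(k, n) - 1):
--         new = [0]
--         for i in range(1, n + 1):
--             new.append(min(max(dp[j], prefix[i] - prefix[j]) for j in range(i)))
--         dp = new
--     x = dp[n]
--     if x <= 0:
--         return -1
--     return x * t % m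
-- ===== Notes on version B (the rewrite author's own statement) =====
-- stated objective: alternative
-- what changed: Replaces A's binary search over the answer (a greedy feasibility probe per midpoint) by a prefix-sum partition DP that computes the optimal worst painter load directly; Pre_ restricts to the problem's natural domain: it excludes boards containing a negative length when the total is positive (board lengths are lengths, and there A's greedy probe is not an optimality criterion, so its binary-search value is an accident of probe order), and excludes m = 0 with positive total, where both programs raise ZeroDivisionError.
-- outside the precondition, e.g. on find_min_paint_time([2, -1, 5, 1], 2, 1, 10000003): A returns 6, B returns 5; on find_min_paint_time([5, -3], 1, 1, 10000003): A returns -1, B returns 2; on find_min_paint_time([2], 1, 3, 0): A raises ZeroDivisionError, B raises ZeroDivisionError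
import Mathlib
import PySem

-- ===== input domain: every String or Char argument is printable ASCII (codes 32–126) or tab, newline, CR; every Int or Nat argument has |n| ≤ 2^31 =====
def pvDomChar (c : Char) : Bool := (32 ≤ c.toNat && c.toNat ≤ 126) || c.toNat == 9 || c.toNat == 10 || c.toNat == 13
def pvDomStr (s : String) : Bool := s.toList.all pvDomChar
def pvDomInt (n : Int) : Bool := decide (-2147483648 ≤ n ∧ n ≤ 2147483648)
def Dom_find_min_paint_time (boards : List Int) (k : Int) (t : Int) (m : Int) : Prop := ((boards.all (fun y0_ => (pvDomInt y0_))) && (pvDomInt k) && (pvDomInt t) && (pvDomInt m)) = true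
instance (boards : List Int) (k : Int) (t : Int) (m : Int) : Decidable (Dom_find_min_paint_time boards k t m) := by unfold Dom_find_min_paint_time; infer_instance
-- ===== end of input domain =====

-- B replaces A's binary search over the answer (greedy feasibility probe per midpoint) by a
-- prefix-sum partition DP that computes the optimum directly; objective: alternative (not faster).

-- ===== PORT A =====
-- partition_possible's loop: state s (current chunk sum), numChunks
def ppLoop (k maxLen : Int) : List Int → Int → Int → Bool
  | [], _, _ => true
  | el :: rest, s, numChunks =>
    if el > maxLen then false
    else
      let s' := s + el
      if s' > maxLen then
        if numChunks + 1 > k then false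
        else ppLoop k maxLen rest el (numChunks + 1)
      else ppLoop k maxLen rest s' numChunks

def partition_possible (boards : List Int) (k maxLen : Int) : Bool :=
  ppLoop k maxLen boards 0 1

-- the while low <= high loop of A
def bsLoop (boards : List Int) (k low high res : Int) : Int :=
  if h : low ≤ high then
    let mid := low + PySem.Int.floordiv (high - low) 2
    if partition_possible boards k mid then bsLoop boards k low (mid - 1) mid
    else bsLoop boards k (mid + 1) high res
  else res
termination_by (high + 1 - low).toNat
decreasing_by
  · have h2 : PySem.Int.floordiv (high - low) 2 = (high - low) / 2 :=
      PySem.Int.floordiv_eq_ediv_of_pos (by norm_num)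
    simp only [h2]; omega
  · have h2 : PySem.Int.floordiv (high - low) 2 = (high - low) / 2 :=
      PySem.Int.floordiv_eq_ediv_of_pos (by norm_num)
    simp only [h2]; omega

def find_min_paint_time (boards : List Int) (k : Int) (t : Int) (m : Int) : Int :=
  let res := bsLoop boards k 1 boards.sum (-1)
  if res > 0 then PySem.Int.mod (res * t) m else -1

-- ===== PORT B =====
-- prefix = [0]; s = 0; for length in boards: s += length; prefix.append(s)
def pvPrefixAux (s : Int) : List Int → List Int
  | [] => []
  | b :: bs => (s + b) :: pvPrefixAux (s + b) bs

def pvPrefix (boards : List Int) : List Int := 0 :: pvPrefixAux 0 boards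

-- one candidate of the inner min: max(dp[j], prefix[i] - prefix[j])
def pvCand (dp pre : List Int) (i j : Nat) : Int :=
  max (dp.getD j 0) (pre.getD i 0 - pre.getD j 0)

-- min(max(dp[j], prefix[i]-prefix[j]) for j in range(i)); range(1, n+1) keeps i ≥ 1,
-- so the [] branch (Python's min on an empty generator would raise) is unreachable
def pvInnerMin (dp pre : List Int) (i : Nat) : Int :=
  match (List.range i).map (pvCand dp pre i) with
  | [] => 0
  | c :: cs => cs.foldl min c

-- new = [0]; for i in range(1, n+1): new.append(min(...))
def pvNewRow (dp pre : List Int) (n : Nat) : List Int :=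
  0 :: (List.range' 1 n).map (fun i => pvInnerMin dp pre i)

-- for _ in range(min(k, n) - 1): dp = new row
def pvDpLoop (pre : List Int) (n : Nat) : Nat → List Int
  | 0 => pre
  | c + 1 => pvNewRow (pvDpLoop pre n c) pre n

def find_min_paint_time_alt (boards : List Int) (k : Int) (t : Int) (m : Int) : Int :=
  let n := boards.length
  let pre := pvPrefix boards
  let dp := pvDpLoop pre n (min k (n : Int) - 1).toNat
  let x := dp.getD n 0
  if x ≤ 0 then -1 else PySem.Int.mod (x * t) m

-- ===== PRECONDITION & SPEC =====
-- Pre_ restricts to the problem's natural domain: it excludes boards containing a negative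
-- length when the total is positive (board lengths are lengths; there A's greedy feasibility
-- probe is not an optimality criterion, so its binary-search value is an accident of probe
-- order), and it excludes m = 0 with positive total, where both programs raise
-- ZeroDivisionError (with total ≤ 0 no modulo is taken and both return -1).
def Pre_find_min_paint_time (boards : List Int) (k : Int) (t : Int) (m : Int) : Prop :=
  ((∀ x ∈ boards, 0 ≤ x) ∧ m ≠ 0) ∨ boards.sum ≤ 0

instance (boards : List Int) (k : Int) (t : Int) (m : Int) : Decidable (Pre_find_min_paint_time boards k t m) := by
  unfold Pre_find_min_paint_time; infer_instance

def pvWitness_find_min_paint_time : List Int × Int × Int × Int := ([1, 2, 3, 4], 2, 5, 10000003)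

def Spec_find_min_paint_time (boards : List Int) (k : Int) (t : Int) (m : Int) (out : Int) : Prop := out = find_min_paint_time_alt boards k t m
instance (boards : List Int) (k : Int) (t : Int) (m : Int) (out : Int) : Decidable (Spec_find_min_paint_time boards k t m out) := by unfold Spec_find_min_paint_time; infer_instance

-- ===== CLAIM (what is proved, stated in full; the proofs are below) =====
def Claim_equal_find_min_paint_time : Prop := ∀ (boards : List Int) (k : Int) (t : Int) (m : Int), Dom_find_min_paint_time boards k t m → Pre_find_min_paint_time boards k t m → Spec_find_min_paint_time boards k t m (find_min_paint_time boards k t m)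

-- ===== LEMMAS AND PROOFS =====

-- ---- chunk-cost specification ----
-- max element of x :: xs
def mEl (x : Int) (xs : List Int) : Int := xs.foldl max x
-- max running prefix sum of x :: xs
def mPS : Int → List Int → Int
  | x, [] => x
  | x, y :: ys => max x (x + mPS y ys)
def mElL : List Int → Int
  | [] => 0
  | x :: xs => mEl x xs
def mPSL : List Int → Int
  | [] => 0
  | x :: xs => mPS x xs
-- cost of a (nonempty) chunk as A's scan sees it: max of its elements and running prefix sums
def costOf (u : List Int) : Int := max (mElL u) (mPSL u)
-- worst chunk cost of a (nonempty) partition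
def pcost : List (List Int) → Int
  | [] => 0
  | q :: Q => (Q.map costOf).foldl max (costOf q)
def PartsOf (bs : List Int) (P : List (List Int)) : Prop :=
  P.flatten = bs ∧ ∀ part ∈ P, part ≠ []
-- the greedy scan condition: every element ≤ L and every carry-running sum ≤ L
def ScanOK (L : Int) : List Int → Int → Prop
  | [], _ => True
  | x :: xs, s => x ≤ L ∧ s + x ≤ L ∧ ScanOK L xs (s + x)

theorem foldl_max_init (a b : Int) (l : List Int) :
    l.foldl max (max a b) = max a (l.foldl max b) := by
  induction l generalizing b with
  | nil => rfl
  | cons y ys ih => simp only [List.foldl]; rw [max_assoc, ih]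

theorem le_foldl_max_self (a : Int) (l : List Int) : a ≤ l.foldl max a := by
  induction l generalizing a with
  | nil => simp
  | cons y ys ih => exact le_trans (le_max_left a y) (ih (max a y))

theorem foldl_max_le_iff (L a : Int) (l : List Int) :
    l.foldl max a ≤ L ↔ a ≤ L ∧ ∀ x ∈ l, x ≤ L := by
  induction l generalizing a with
  | nil => simp
  | cons y ys ih =>
    simp only [List.foldl_cons, ih, max_le_iff, List.mem_cons]
    constructor
    · rintro ⟨⟨h1, h2⟩, h3⟩
      exact ⟨h1, fun x hx => by rcases hx with rfl | hx; exact h2; exact h3 x hx⟩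
    · rintro ⟨h1, h2⟩
      exact ⟨⟨h1, h2 y (Or.inl rfl)⟩, fun x hx => h2 x (Or.inr hx)⟩

theorem add_sum_le_mPS : ∀ (xs : List Int) (x : Int), x + xs.sum ≤ mPS x xs := by
  intro xs
  induction xs with
  | nil => intro x; simp [mPS]
  | cons y ys ih =>
    intro x
    have h := ih y
    simp only [mPS, List.sum_cons]
    omega

theorem mPS_le_of_nonneg : ∀ (xs : List Int) (x : Int), (∀ y ∈ xs, 0 ≤ y) → mPS x xs ≤ x + xs.sum := by
  intro xs
  induction xs with
  | nil => intro x _; simp [mPS]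
  | cons y ys ih =>
    intro x hnn
    have h1 := ih y (fun z hz => hnn z (List.mem_cons_of_mem _ hz))
    have h2 : (0:Int) ≤ ys.sum := List.sum_nonneg (fun z hz => hnn z (List.mem_cons_of_mem _ hz))
    have h3 : (0:Int) ≤ y := hnn y List.mem_cons_self
    simp only [mPS, List.sum_cons]
    omega

theorem sum_le_mPSL {u : List Int} (hu : u ≠ []) : u.sum ≤ mPSL u := by
  rcases u with _ | ⟨x, xs⟩
  · exact absurd rfl hu
  · simpa [mPSL, List.sum_cons] using add_sum_le_mPS xs x

theorem mElL_le_iff {u : List Int} {L : Int} (hu : u ≠ []) :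
    mElL u ≤ L ↔ ∀ x ∈ u, x ≤ L := by
  rcases u with _ | ⟨x, xs⟩
  · exact absurd rfl hu
  · simp only [mElL, mEl, foldl_max_le_iff, List.forall_mem_cons]

theorem costOf_singleton (x : Int) : costOf [x] = x := by
  simp [costOf, mElL, mPSL, mEl, mPS]

theorem costOf_eq_sum {u : List Int} (hu : u ≠ []) (h0 : ∀ x ∈ u, 0 ≤ x) :
    costOf u = u.sum := by
  have h1 : mElL u ≤ u.sum := (mElL_le_iff hu).2 (fun x hx => List.single_le_sum h0 x hx)
  have h2 : u.sum ≤ mPSL u := sum_le_mPSL hu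
  have h3 : mPSL u ≤ u.sum := by
    rcases u with _ | ⟨x, xs⟩
    · exact absurd rfl hu
    · have := mPS_le_of_nonneg xs x (fun z hz => h0 z (List.mem_cons_of_mem _ hz))
      simpa [mPSL, List.sum_cons] using this
  simp only [costOf]
  omega

theorem scan_iff (L : Int) (u : List Int) (s : Int) :
    ScanOK L u s ↔ (∀ x ∈ u, x ≤ L) ∧ (u = [] ∨ s + mPSL u ≤ L) := by
  induction u generalizing s with
  | nil => simp [ScanOK]
  | cons x xs ih =>
    simp only [ScanOK, ih (s + x), List.forall_mem_cons, List.cons_ne_nil, false_or]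
    rcases xs with _ | ⟨y, ys⟩
    · simp only [mPSL, mPS, List.not_mem_nil, false_implies, implies_true, true_and,
        and_true, List.nil_eq, or_true]
      constructor
      · rintro ⟨h1, h2, _⟩; exact ⟨h1, by omega⟩
      · rintro ⟨h1, h2⟩; exact ⟨h1, by omega, Or.inl trivial⟩
    · simp only [mPSL, mPS, List.cons_ne_nil, false_or]
      constructor
      · rintro ⟨h1, h2, h3, h4⟩
        exact ⟨⟨h1, h3⟩, by omega⟩
      · rintro ⟨⟨h1, h3⟩, h4⟩
        exact ⟨h1, by omega, h3, by omega⟩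

theorem scan_zero_iff_cost {L : Int} {u : List Int} (hu : u ≠ []) :
    ScanOK L u 0 ↔ costOf u ≤ L := by
  rw [scan_iff]
  simp only [costOf, max_le_iff]
  constructor
  · rintro ⟨h1, (h2 | h2)⟩
    · exact absurd h2 hu
    · exact ⟨(mElL_le_iff hu).2 h1, by omega⟩
  · rintro ⟨h1, h2⟩
    exact ⟨(mElL_le_iff hu).1 h1, Or.inr (by omega)⟩

theorem pcost_cons (q q' : List Int) (Q : List (List Int)) :
    pcost (q :: q' :: Q) = max (costOf q) (pcost (q' :: Q)) := by
  simp only [pcost, List.map_cons, List.foldl_cons]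
  exact foldl_max_init _ _ _

theorem mem_le_pcost {P : List (List Int)} {part : List Int} (hp : part ∈ P) :
    costOf part ≤ pcost P := by
  induction P with
  | nil => cases hp
  | cons q Q ih =>
    rcases List.mem_cons.1 hp with rfl | h
    · exact le_foldl_max_self _ _
    · rcases Q with _ | ⟨q', Q'⟩
      · cases h
      · rw [pcost_cons]
        exact le_trans (ih h) (le_max_right _ _)

theorem pcost_le_of_all {P : List (List Int)} {L : Int} (hne : P ≠ [])
    (h : ∀ part ∈ P, costOf part ≤ L) : pcost P ≤ L := by
  induction P with
  | nil => exact absurd rfl hne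
  | cons q Q ih =>
    rcases Q with _ | ⟨q', Q'⟩
    · simpa [pcost] using h q List.mem_cons_self
    · rw [pcost_cons]
      exact max_le (h q List.mem_cons_self)
        (ih (List.cons_ne_nil _ _) (fun part hp => h part (List.mem_cons_of_mem _ hp)))

theorem pcost_concat (Q : List (List Int)) (u : List Int) (hQ : Q ≠ []) :
    pcost (Q ++ [u]) = max (pcost Q) (costOf u) := by
  rcases Q with _ | ⟨q, Q'⟩
  · exact absurd rfl hQ
  · simp only [List.cons_append, pcost, List.map_append, List.map_cons, List.map_nil,
      List.foldl_append, List.foldl_cons, List.foldl_nil]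

theorem parts_length_le {bs : List Int} {P : List (List Int)} (h : PartsOf bs P) :
    P.length ≤ bs.length := by
  obtain ⟨hf, hne⟩ := h
  rw [← hf]
  clear hf
  induction P with
  | nil => simp
  | cons q Q ih =>
    have h1 : 1 ≤ q.length := List.length_pos_of_ne_nil (hne q List.mem_cons_self)
    have h2 := ih (fun part hp => hne part (List.mem_cons_of_mem _ hp))
    simp only [List.flatten_cons, List.length_append, List.length_cons]
    omega

theorem parts_of_le_one {u : List Int} {P : List (List Int)} (hu : u ≠ [])
    (h : PartsOf u P) (hl : P.length ≤ 1) : P = [u] := by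
  rcases P with _ | ⟨q, Q⟩
  · exact absurd h.1.symm (by simpa using hu)
  · rcases Q with _ | ⟨q2, Q2⟩
    · have : q = u := by simpa using h.1
      rw [this]
    · simp at hl

-- ---- A-side: characterizations of the greedy scan ----

-- k < numChunks + 1: a break is impossible, the scan just checks ScanOK
theorem ppLoop_noBreak {k L : Int} : ∀ (bs : List Int) (s c : Int), k < c + 1 →
    (ppLoop k L bs s c = true ↔ ScanOK L bs s) := by
  intro bs
  induction bs with
  | nil => intro s c _; simp [ppLoop, ScanOK]
  | cons el rest ih =>
    intro s c hk
    simp only [ppLoop, ScanOK]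
    by_cases h1 : el > L
    · rw [if_pos h1]
      simp only [Bool.false_eq_true, false_iff]
      rintro ⟨h2, _⟩; omega
    · rw [if_neg h1]
      by_cases h2 : s + el > L
      · rw [if_pos h2, if_pos (by omega : c + 1 > k)]
        simp only [Bool.false_eq_true, false_iff]
        rintro ⟨_, h3, _⟩; omega
      · rw [if_neg h2, ih (s + el) c hk]
        constructor
        · intro h; exact ⟨by omega, by omega, h⟩
        · rintro ⟨_, _, h⟩; exact h

-- nonneg boards: a successful scan yields a partition with all chunk costs ≤ L
theorem ppLoop_extract {k L : Int} : ∀ (bs : List Int) (s c : Int),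
    (∀ x ∈ bs, 0 ≤ x) → 0 ≤ s → c ≤ k → ppLoop k L bs s c = true →
    ∃ P, PartsOf bs P ∧
      (((P.length : Int) ≤ k - c ∧ ∀ part ∈ P, costOf part ≤ L) ∨
       ((P.length : Int) ≤ k - c + 1 ∧
         ∃ h tl, P = h :: tl ∧ ScanOK L h s ∧ ∀ part ∈ tl, costOf part ≤ L) ∨
       P = []) := by
  intro bs
  induction bs with
  | nil =>
    intro s c _ _ _ _
    exact ⟨[], ⟨rfl, by simp⟩, Or.inr (Or.inr rfl)⟩
  | cons el rest ih =>
    intro s c hnn hs hck hpp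
    have hel0 : 0 ≤ el := hnn el List.mem_cons_self
    have hrest := fun x hx => hnn x (List.mem_cons_of_mem _ hx)
    simp only [ppLoop] at hpp
    by_cases h1 : el > L
    · rw [if_pos h1] at hpp; cases hpp
    · rw [if_neg h1] at hpp
      by_cases h2 : s + el > L
      · rw [if_pos h2] at hpp
        by_cases h3 : c + 1 > k
        · rw [if_pos h3] at hpp; cases hpp
        · rw [if_neg h3] at hpp
          obtain ⟨P', hP', hd⟩ := ih el (c + 1) hrest hel0 (by omega) hpp
          rcases hd with ⟨hlen, hcosts⟩ | ⟨hlen, h', tl', rfl, hscan, hcosts⟩ | rfl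
          · refine ⟨[el] :: P', ⟨?_, ?_⟩, Or.inl ⟨?_, ?_⟩⟩
            · simp [List.flatten_cons, hP'.1]
            · rintro part hp
              rcases List.mem_cons.1 hp with rfl | hp
              · simp
              · exact hP'.2 part hp
            · simp only [List.length_cons]; push_cast; push_cast at hlen; omega
            · rintro part hp
              rcases List.mem_cons.1 hp with rfl | hp
              · rw [costOf_singleton]; omega
              · exact hcosts part hp
          · refine ⟨(el :: h') :: tl', ⟨?_, ?_⟩, Or.inl ⟨?_, ?_⟩⟩
            · have := hP'.1; simp only [List.flatten_cons] at this ⊢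
              simp [← this]
            · rintro part hp
              rcases List.mem_cons.1 hp with rfl | hp
              · simp
              · exact hP'.2 part (List.mem_cons_of_mem _ hp)
            · simp only [List.length_cons] at hlen ⊢; push_cast at hlen ⊢; omega
            · rintro part hp
              rcases List.mem_cons.1 hp with rfl | hp
              · rw [← scan_zero_iff_cost (List.cons_ne_nil _ _)]
                exact ⟨by omega, by omega, by simpa using hscan⟩
              · exact hcosts part hp
          · have hrest0 : rest = [] := by simpa using hP'.1.symm
            subst hrest0
            refine ⟨[[el]], ⟨by simp, by simp⟩, Or.inl ⟨by simp; omega, ?_⟩⟩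
            rintro part hp
            rcases List.mem_cons.1 hp with rfl | hp
            · rw [costOf_singleton]; omega
            · cases hp
      · rw [if_neg h2] at hpp
        obtain ⟨P', hP', hd⟩ := ih (s + el) c hrest (by omega) hck hpp
        rcases hd with ⟨hlen, hcosts⟩ | ⟨hlen, h', tl', rfl, hscan, hcosts⟩ | rfl
        · refine ⟨[el] :: P', ⟨?_, ?_⟩, Or.inr (Or.inl ⟨?_, [el], P', rfl, ?_, hcosts⟩)⟩
          · simp [List.flatten_cons, hP'.1]
          · rintro part hp
            rcases List.mem_cons.1 hp with rfl | hp
            · simp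
            · exact hP'.2 part hp
          · simp only [List.length_cons]; push_cast; push_cast at hlen; omega
          · exact ⟨by omega, by omega, trivial⟩
        · refine ⟨(el :: h') :: tl', ⟨?_, ?_⟩,
            Or.inr (Or.inl ⟨?_, el :: h', tl', rfl, ⟨by omega, by omega, hscan⟩, hcosts⟩)⟩
          · have := hP'.1; simp only [List.flatten_cons] at this ⊢
            simp [← this]
          · rintro part hp
            rcases List.mem_cons.1 hp with rfl | hp
            · simp
            · exact hP'.2 part (List.mem_cons_of_mem _ hp)
          · simp only [List.length_cons] at hlen ⊢; push_cast at hlen ⊢; omega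
        · have hrest0 : rest = [] := by simpa using hP'.1.symm
          subst hrest0
          refine ⟨[[el]], ⟨by simp, by simp⟩,
            Or.inr (Or.inl ⟨by simp; omega, [el], [], rfl, ⟨by omega, by omega, trivial⟩, by simp⟩)⟩

-- nonneg chunk with sum ≤ L scanned with carry 0 passes without a break
theorem ppLoop_chunk_zero {k L : Int} : ∀ (xs : List Int) (rest : List Int) (s c : Int),
    (∀ x ∈ xs, 0 ≤ x) → 0 ≤ s → s + xs.sum ≤ L →
    ppLoop k L (xs ++ rest) s c = ppLoop k L rest (s + xs.sum) c := by
  intro xs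
  induction xs with
  | nil => intro rest s c _ _ _; simp
  | cons el xs' ih =>
    intro rest s c hnn hs hsum
    have hel0 : 0 ≤ el := hnn el List.mem_cons_self
    have hrest := fun x hx => hnn x (List.mem_cons_of_mem _ hx)
    have hsum' : (0:Int) ≤ xs'.sum := List.sum_nonneg hrest
    simp only [List.sum_cons] at hsum
    simp only [List.cons_append, ppLoop]
    rw [if_neg (by omega : ¬ el > L), if_neg (by omega : ¬ s + el > L)]
    rw [ih rest (s + el) c hrest (by omega) (by omega)]
    have : s + el + xs'.sum = s + (el :: xs').sum := by simp [List.sum_cons]; ring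
    rw [this]

-- nonneg chunk with sum ≤ L scanned with any nonneg carry: at most one break
theorem ppLoop_chunk_carry {k L : Int} : ∀ (xs : List Int) (rest : List Int) (s c : Int),
    (∀ x ∈ xs, 0 ≤ x) → xs.sum ≤ L → 0 ≤ s → c + 1 ≤ k →
    ∃ s' c', ppLoop k L (xs ++ rest) s c = ppLoop k L rest s' c' ∧ 0 ≤ s' ∧ c ≤ c' ∧ c' ≤ c + 1 := by
  intro xs
  induction xs with
  | nil =>
    intro rest s c _ _ hs _
    exact ⟨s, c, by simp, hs, le_refl _, by omega⟩
  | cons el xs' ih =>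
    intro rest s c hnn hsum hs hck
    have hel0 : 0 ≤ el := hnn el List.mem_cons_self
    have hrest := fun x hx => hnn x (List.mem_cons_of_mem _ hx)
    have hsum' : (0:Int) ≤ xs'.sum := List.sum_nonneg hrest
    simp only [List.sum_cons] at hsum
    simp only [List.cons_append, ppLoop]
    rw [if_neg (by omega : ¬ el > L)]
    by_cases h2 : s + el > L
    · rw [if_pos h2, if_neg (by omega : ¬ c + 1 > k)]
      rw [ppLoop_chunk_zero xs' rest el (c + 1) hrest hel0 (by omega)]
      exact ⟨el + xs'.sum, c + 1, rfl, by omega, by omega, le_refl _⟩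
    · rw [if_neg h2]
      exact ih rest (s + el) c hrest (by omega) (by omega) hck

-- nonneg boards: a partition with ≤ k parts and all part sums ≤ L makes the greedy scan succeed
theorem ppLoop_ofParts {k L : Int} : ∀ (P : List (List Int)) (s c : Int),
    (∀ part ∈ P, part ≠ [] ∧ (∀ x ∈ part, 0 ≤ x) ∧ part.sum ≤ L) → 0 ≤ s →
    ((s = 0 ∧ (c + P.length : Int) ≤ k + 1) ∨ ((c + P.length : Int) ≤ k)) →
    ppLoop k L P.flatten s c = true := by
  intro P
  induction P with
  | nil => intro s c _ _ _; simp [ppLoop]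
  | cons part P' ih =>
    intro s c hparts hs hb
    obtain ⟨hpne, hpnn, hpsum⟩ := hparts part List.mem_cons_self
    have hrest := fun p hp => hparts p (List.mem_cons_of_mem _ hp)
    have hlen' : (0:Int) ≤ (P'.length : Int) := by positivity
    simp only [List.length_cons] at hb
    simp only [List.flatten_cons]
    rcases hb with ⟨hs0, hb⟩ | hb
    · subst hs0
      rw [ppLoop_chunk_zero part P'.flatten 0 c hpnn (le_refl _) (by omega)]
      rw [zero_add]
      have hps : (0:Int) ≤ part.sum := List.sum_nonneg hpnn
      exact ih part.sum c hrest hps (Or.inr (by push_cast at hb ⊢; omega))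
    · have hck : c + 1 ≤ k := by push_cast at hb; omega
      obtain ⟨s', c', heq, hs', hc1, hc2⟩ :=
        ppLoop_chunk_carry part P'.flatten s c hpnn hpsum hs hck
      rw [heq]
      exact ih s' c' hrest hs' (Or.inr (by push_cast at hb ⊢; omega))

-- ---- the binary search ----

theorem bsLoop_eval {boards : List Int} {k X : Int}
    (hch : ∀ L, partition_possible boards k L = true ↔ X ≤ L) :
    ∀ low high res, bsLoop boards k low high res = if max X low ≤ high then max X low else res := by
  suffices H : ∀ (fuel : Nat) (low high res : Int), (high + 1 - low).toNat ≤ fuel →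
      bsLoop boards k low high res = if max X low ≤ high then max X low else res by
    intro low high res
    exact H (high + 1 - low).toNat low high res (le_refl _)
  intro fuel
  induction fuel with
  | zero =>
    intro low high res hf
    have hlh : ¬ low ≤ high := by omega
    rw [bsLoop.eq_def, dif_neg hlh, if_neg (by omega)]
  | succ n ih =>
    intro low high res hf
    by_cases hlh : low ≤ high
    · have hfd : PySem.Int.floordiv (high - low) 2 = (high - low) / 2 :=
        PySem.Int.floordiv_eq_ediv_of_pos (by norm_num)
      rw [bsLoop.eq_def]
      simp only [dif_pos hlh, hfd]
      have hmlo : low ≤ low + (high - low) / 2 := by omega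
      have hmhi : low + (high - low) / 2 ≤ high := by omega
      by_cases hpp : partition_possible boards k (low + (high - low) / 2) = true
      · rw [if_pos hpp]
        have hXm : X ≤ low + (high - low) / 2 := (hch _).1 hpp
        rw [ih low (low + (high - low) / 2 - 1) (low + (high - low) / 2) (by omega)]
        split_ifs <;> omega
      · rw [if_neg hpp]
        have hXm : ¬ X ≤ low + (high - low) / 2 := fun hx => hpp ((hch _).2 hx)
        rw [ih (low + (high - low) / 2 + 1) high res (by omega)]
        split_ifs <;> omega
    · rw [bsLoop.eq_def, dif_neg hlh, if_neg (by omega)]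

-- ---- per-case characterizations: partition_possible boards k L ↔ X ≤ L ----

theorem char_k_le_one {boards : List Int} {k : Int} (hb : boards ≠ []) (hk : k ≤ 1) :
    ∀ L, partition_possible boards k L = true ↔ costOf boards ≤ L := by
  intro L
  unfold partition_possible
  rw [ppLoop_noBreak boards 0 1 (by omega)]
  exact scan_zero_iff_cost hb

-- nonneg case: feasibility ↔ some partition into ≤ k parts has cost ≤ L
theorem char_nonneg {boards : List Int} {k : Int} (hb : boards ≠ [])
    (h0 : ∀ x ∈ boards, 0 ≤ x) (hk : 1 ≤ k) :
    ∀ L, partition_possible boards k L = true ↔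
      ∃ P, PartsOf boards P ∧ (P.length : Int) ≤ k ∧ pcost P ≤ L := by
  intro L
  constructor
  · intro hpp
    unfold partition_possible at hpp
    obtain ⟨P, hPparts, hd⟩ := ppLoop_extract boards 0 1 h0 (le_refl 0) hk hpp
    have hPne : P ≠ [] := by
      intro hP0
      subst hP0
      exact hb hPparts.1.symm
    rcases hd with ⟨hlen, hcosts⟩ | ⟨hlen, h', tl', rfl, hscan, hcosts⟩ | rfl
    · exact ⟨P, hPparts, by omega, pcost_le_of_all hPne hcosts⟩
    · have hne' : h' ≠ [] := hPparts.2 h' List.mem_cons_self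
      have hc : costOf h' ≤ L := (scan_zero_iff_cost hne').1 hscan
      refine ⟨h' :: tl', hPparts, by omega, pcost_le_of_all hPne ?_⟩
      intro part hp
      rcases List.mem_cons.1 hp with rfl | hp
      · exact hc
      · exact hcosts part hp
    · exact absurd hPparts.1.symm hb
  · rintro ⟨P, hPparts, hlen, hpc⟩
    unfold partition_possible
    rw [← hPparts.1]
    refine ppLoop_ofParts P 0 1 ?_ (le_refl _) (Or.inl ⟨rfl, by omega⟩)
    intro part hp
    refine ⟨hPparts.2 part hp, ?_, ?_⟩
    · intro y hy
      exact h0 y (by rw [← hPparts.1]; exact List.mem_flatten.2 ⟨part, hp, hy⟩)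
    · have hs1 := sum_le_mPSL (hPparts.2 part hp)
      have hs2 : mPSL part ≤ costOf part := le_max_right _ _
      have hs3 := mem_le_pcost hp
      omega

-- ---- B-side: prefix sums and the DP rows ----

theorem pvPrefixAux_getD (l : List Int) : ∀ (s : Int) (j : Nat), j < l.length →
    (pvPrefixAux s l).getD j 0 = s + (l.take (j + 1)).sum := by
  induction l with
  | nil => intro s j hj; simp at hj
  | cons b bs ih =>
    intro s j hj
    rcases j with _ | jj
    · simp [pvPrefixAux]
    · simp only [pvPrefixAux, List.getD_cons_succ, List.take_succ_cons, List.sum_cons]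
      rw [ih (s + b) jj (by simpa using hj)]
      ring

theorem pvPrefix_getD (boards : List Int) (j : Nat) (hj : j ≤ boards.length) :
    (pvPrefix boards).getD j 0 = (boards.take j).sum := by
  rcases j with _ | jj
  · simp [pvPrefix]
  · simp only [pvPrefix, List.getD_cons_succ]
    rw [pvPrefixAux_getD boards 0 jj (by omega)]
    ring

theorem foldl_min_le_self (a : Int) (l : List Int) : l.foldl min a ≤ a := by
  induction l generalizing a with
  | nil => simp
  | cons y ys ih => exact le_trans (ih (min a y)) (min_le_left a y)

theorem foldl_min_le_mem {x : Int} (a : Int) {l : List Int} (hx : x ∈ l) :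
    l.foldl min a ≤ x := by
  induction l generalizing a with
  | nil => cases hx
  | cons y ys ih =>
    rcases List.mem_cons.1 hx with rfl | h
    · rw [List.foldl_cons]
      exact le_trans (foldl_min_le_self (min a x) ys) (min_le_right a x)
    · exact ih _ h

theorem foldl_min_ach (a : Int) (l : List Int) : l.foldl min a = a ∨ l.foldl min a ∈ l := by
  induction l generalizing a with
  | nil => exact Or.inl rfl
  | cons y ys ih =>
    rcases ih (min a y) with h | h
    · rcases le_total a y with hay | hay
      · exact Or.inl (by rw [List.foldl_cons, h, min_eq_left hay])
      · exact Or.inr (by rw [List.foldl_cons, h, min_eq_right hay]; exact List.mem_cons_self)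
    · exact Or.inr (List.mem_cons_of_mem _ h)

theorem innerMin_le (dp pre : List Int) {i j : Nat} (hj : j < i) :
    pvInnerMin dp pre i ≤ pvCand dp pre i j := by
  have hmem : pvCand dp pre i j ∈ (List.range i).map (pvCand dp pre i) :=
    List.mem_map.2 ⟨j, List.mem_range.2 hj, rfl⟩
  unfold pvInnerMin
  rcases hc : (List.range i).map (pvCand dp pre i) with _ | ⟨c, cs⟩
  · rw [hc] at hmem; cases hmem
  · rw [hc] at hmem
    rcases List.mem_cons.1 hmem with heq | hmem'
    · rw [← heq] at *
      exact foldl_min_le_self _ _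
    · exact foldl_min_le_mem _ hmem'

theorem innerMin_ach (dp pre : List Int) {i : Nat} (hi : 1 ≤ i) :
    ∃ j < i, pvInnerMin dp pre i = pvCand dp pre i j := by
  unfold pvInnerMin
  rcases hc : (List.range i).map (pvCand dp pre i) with _ | ⟨c, cs⟩
  · have := congrArg List.length hc
    simp at this
    omega
  · have hres : cs.foldl min c ∈ c :: cs := by
      rcases foldl_min_ach c cs with h | h
      · rw [h]; exact List.mem_cons_self
      · exact List.mem_cons_of_mem _ h
    rw [← hc] at hres
    obtain ⟨j, hj, hval⟩ := List.mem_map.1 hres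
    exact ⟨j, List.mem_range.1 hj, hval.symm⟩

theorem pvNewRow_getD (dp pre : List Int) (n i : Nat) (h1 : 1 ≤ i) (h2 : i ≤ n) :
    (pvNewRow dp pre n).getD i 0 = pvInnerMin dp pre i := by
  obtain ⟨ii, rfl⟩ : ∃ ii, i = ii + 1 := ⟨i - 1, by omega⟩
  simp only [pvNewRow, List.getD_cons_succ]
  have hii : ii < n := by omega
  simp [List.getD, List.getElem?_map, List.getElem?_range', hii, Nat.add_comm]

theorem dpLoop_getD0 (boards : List Int) (c : Nat) :
    (pvDpLoop (pvPrefix boards) boards.length c).getD 0 0 = 0 := by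
  cases c with
  | zero => rfl
  | succ c' => rfl

theorem seg_sum (boards : List Int) (j i : Nat) (hji : j ≤ i) :
    ((boards.take i).drop j).sum = (boards.take i).sum - (boards.take j).sum := by
  have h : (boards.take i) = ((boards.take i).take j) ++ ((boards.take i).drop j) :=
    (List.take_append_drop _ _).symm
  have hs := congrArg List.sum h
  rw [List.sum_append, List.take_take, min_eq_left hji] at hs
  omega

-- row semantics: entry i is the min over partitions of the first i boards into at most B parts
def PRowOK (boards : List Int) (B : Nat) (dp : List Int) : Prop :=
  ∀ i : Nat, 1 ≤ i → i ≤ boards.length →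
    (∀ P, PartsOf (boards.take i) P → P.length ≤ B → dp.getD i 0 ≤ pcost P) ∧
    (∃ P, PartsOf (boards.take i) P ∧ 1 ≤ P.length ∧ P.length ≤ B ∧ pcost P = dp.getD i 0)

theorem prow_base (boards : List Int) (h0 : ∀ x ∈ boards, 0 ≤ x) :
    PRowOK boards 1 (pvPrefix boards) := by
  intro i h1 h2
  have hne : boards.take i ≠ [] := by
    intro h
    have := congrArg List.length h
    simp only [List.length_take, List.length_nil] at this
    omega
  have hget : (pvPrefix boards).getD i 0 = (boards.take i).sum := pvPrefix_getD _ _ h2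
  have hcost : costOf (boards.take i) = (boards.take i).sum :=
    costOf_eq_sum hne (fun x hx => h0 x (List.mem_of_mem_take hx))
  constructor
  · intro P hP hlen
    rw [parts_of_le_one hne hP hlen]
    rw [hget]
    simp only [pcost, List.map_nil, List.foldl_nil]
    omega
  · refine ⟨[boards.take i], ⟨by simp, ?_⟩, by simp, by simp, ?_⟩
    · intro part hp
      rcases List.mem_cons.1 hp with rfl | hp
      · exact hne
      · cases hp
    · simp only [pcost, List.map_nil, List.foldl_nil]
      omega

theorem prow_step (boards : List Int) (B : Nat) (dp : List Int)
    (h0 : ∀ x ∈ boards, 0 ≤ x) (hdp0 : dp.getD 0 0 = 0) (hrow : PRowOK boards B dp) :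
    PRowOK boards (B + 1) (pvNewRow dp (pvPrefix boards) boards.length) := by
  intro i h1 h2
  rw [pvNewRow_getD dp (pvPrefix boards) boards.length i h1 h2]
  have hlen_take : (boards.take i).length = i := by simp; omega
  have hne : boards.take i ≠ [] := by
    intro h; have := congrArg List.length h; rw [hlen_take] at this; simp at this; omega
  have hnn_take : ∀ x ∈ boards.take i, 0 ≤ x := fun x hx => h0 x (List.mem_of_mem_take hx)
  have hsum0 : (0:Int) ≤ (boards.take i).sum := List.sum_nonneg hnn_take
  have hcand0 : pvCand dp (pvPrefix boards) i 0 = (boards.take i).sum := by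
    unfold pvCand
    rw [pvPrefix_getD boards i h2, pvPrefix_getD boards 0 (by omega), hdp0]
    simp
    omega
  have hcandj : ∀ j : Nat, j ≤ i →
      pvCand dp (pvPrefix boards) i j = max (dp.getD j 0) (((boards.take i).drop j).sum) := by
    intro j hj
    unfold pvCand
    rw [pvPrefix_getD boards i h2, pvPrefix_getD boards j (by omega), seg_sum boards j i hj]
  constructor
  · -- lower bound
    intro P hP hlenP
    rcases List.eq_nil_or_concat P with rfl | ⟨Q, u, rfl⟩
    · exact absurd hP.1.symm (by simpa using hne)
    simp only [List.concat_eq_append] at hP hlenP ⊢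
    have hu_ne : u ≠ [] := hP.2 u (by simp)
    have hflat : Q.flatten ++ u = boards.take i := by
      have := hP.1; simpa using this
    rcases Q with _ | ⟨q, Q'⟩
    · -- single chunk
      have hu : u = boards.take i := by simpa using hflat
      have hpc : pcost [u] = costOf u := by simp [pcost]
      simp only [List.nil_append]
      rw [hpc, hu, costOf_eq_sum hne hnn_take, ← hcand0]
      exact innerMin_le _ _ (by omega)
    · set Q := q :: Q' with hQdef
      have hQne : Q ≠ [] := by simp [hQdef]
      set jq := Q.flatten.length with hjq
      have hjqu : jq + u.length = i := by
        have h := congrArg List.length hflat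
        rw [List.length_append, hlen_take] at h
        rw [hjq]; exact h
      have hu1 : 1 ≤ u.length := List.length_pos_of_ne_nil hu_ne
      have hq1 : 1 ≤ jq := by
        have hqne : q ≠ [] := hP.2 q (by
          rw [hQdef]
          exact List.mem_append_left _ List.mem_cons_self)
        have : 1 ≤ q.length := List.length_pos_of_ne_nil hqne
        simp only [hjq, hQdef, List.flatten_cons, List.length_append]
        omega
      have hQflat : Q.flatten = boards.take jq := by
        have h1 : (Q.flatten ++ u).take jq = Q.flatten := List.take_left
        rw [hflat] at h1
        rw [← h1, List.take_take, min_eq_left (by omega)]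
      have hu_eq : u = (boards.take i).drop jq := by
        have h1 : (Q.flatten ++ u).drop jq = u := List.drop_left
        rw [hflat] at h1
        exact h1.symm
      have hQparts : PartsOf (boards.take jq) Q :=
        ⟨hQflat, fun part hp => hP.2 part (List.mem_append_left _ hp)⟩
      have hIH := (hrow jq hq1 (by omega)).1 Q hQparts (by
        have := hlenP; simp only [List.length_append, List.length_cons, List.length_nil] at this; omega)
      have hcost_u : costOf u = u.sum :=
        costOf_eq_sum hu_ne (fun x hx => hnn_take x (List.mem_of_mem_drop (hu_eq ▸ hx)))
      have hstep := innerMin_le dp (pvPrefix boards) (show jq < i by omega)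
      rw [hcandj jq (by omega)] at hstep
      have hu_sum : ((boards.take i).drop jq).sum = u.sum := by rw [← hu_eq]
      rw [hu_sum] at hstep
      refine le_trans hstep ?_
      rw [pcost_concat Q u hQne]
      exact max_le_max hIH (le_of_eq hcost_u.symm)
  · -- achieved
    obtain ⟨j, hj, hval⟩ := innerMin_ach dp (pvPrefix boards) h1
    rcases Nat.eq_zero_or_pos j with rfl | hj1
    · refine ⟨[boards.take i], ⟨by simp, ?_⟩, by simp, by simp, ?_⟩
      · intro part hp
        rcases List.mem_cons.1 hp with rfl | hp
        · exact hne
        · cases hp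
      · rw [hval, hcand0]
        simp only [pcost, List.map_nil, List.foldl_nil]
        rw [costOf_eq_sum hne hnn_take]
    · obtain ⟨Q, hQparts, hQ1, hQB, hQpc⟩ := (hrow j hj1 (by omega)).2
      set u := (boards.take i).drop j with hu
      have hu_len : u.length = i - j := by simp [hu, hlen_take]
      have hu_ne : u ≠ [] := by
        intro h; have := congrArg List.length h; rw [hu_len] at this; simp at this; omega
      have hu_nn : ∀ x ∈ u, 0 ≤ x := fun x hx => hnn_take x (List.mem_of_mem_drop hx)
      have hQne : Q ≠ [] := by
        intro h; subst h; simp at hQ1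
      refine ⟨Q ++ [u], ⟨?_, ?_⟩, ?_, ?_, ?_⟩
      · rw [List.flatten_append, hQparts.1]
        simp only [List.flatten_cons, List.flatten_nil, List.append_nil]
        rw [hu]
        have : boards.take j = (boards.take i).take j := by
          rw [List.take_take, min_eq_left (by omega)]
        rw [this, List.take_append_drop]
      · intro part hp
        rcases List.mem_append.1 hp with hp | hp
        · exact hQparts.2 part hp
        · rcases List.mem_cons.1 hp with rfl | hp
          · exact hu_ne
          · cases hp
      · simp
      · simp only [List.length_append, List.length_cons, List.length_nil]
        omega
      · rw [pcost_concat Q u hQne, hQpc, costOf_eq_sum hu_ne hu_nn]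
        rw [hval, hcandj j (by omega), ← hu]

theorem prow_rows (boards : List Int) (h0 : ∀ x ∈ boards, 0 ≤ x) :
    ∀ c : Nat, PRowOK boards (c + 1) (pvDpLoop (pvPrefix boards) boards.length c) := by
  intro c
  induction c with
  | zero => exact prow_base boards h0
  | succ c' ih =>
    exact prow_step boards (c' + 1) _ h0 (dpLoop_getD0 boards c') ih

-- ===== VERDICT (by name: the statement is the Claim_ definition above) =====
theorem prow_le_sum (boards : List Int) (h0 : ∀ x ∈ boards, 0 ≤ x) (hb : boards ≠ [])
    {B : Nat} {dp : List Int} (hB : 1 ≤ B) (hrow : PRowOK boards B dp) :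
    dp.getD boards.length 0 ≤ boards.sum := by
  have hn : 1 ≤ boards.length := List.length_pos_of_ne_nil hb
  have h := (hrow boards.length hn (le_refl _)).1 [boards]
    (by rw [List.take_length]; exact ⟨by simp, by intro p hp; rcases List.mem_cons.1 hp with rfl | hp; exact hb; cases hp⟩)
    (by simp only [List.length_cons, List.length_nil]; omega)
  have hpc : pcost [boards] = costOf boards := by simp [pcost]
  rw [hpc, costOf_eq_sum hb h0] at h
  exact h

theorem find_min_paint_time_spec : Claim_equal_find_min_paint_time := by
  unfold Claim_equal_find_min_paint_time
  intro boards k t m _ hpre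
  unfold Spec_find_min_paint_time
  unfold find_min_paint_time find_min_paint_time_alt
  set n := boards.length with hn
  set pre := pvPrefix boards with hpre'
  set iters := (min k (n : Int) - 1).toNat with hiters
  set dp := pvDpLoop pre n iters with hdp
  set X := dp.getD n 0 with hX
  by_cases hs : boards.sum ≤ 0
  · -- total ≤ 0: A's search range is empty, B's optimum is ≤ 0; both return -1
    have hA : bsLoop boards k 1 boards.sum (-1) = -1 := by
      rw [bsLoop.eq_def, dif_neg (by omega : ¬ (1:Int) ≤ boards.sum)]
    rw [hA]
    have hXle : X ≤ 0 := by
      rcases hc : iters with _ | c'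
      · rw [hX, hdp, hc]
        show pre.getD n 0 ≤ 0
        rw [hpre', pvPrefix_getD boards n (le_refl _), List.take_length]
        exact hs
      · rcases hnn : n with _ | nn
        · rw [hX, hdp, hc, hnn]
          show (pvNewRow _ pre 0).getD 0 0 ≤ 0
          simp [pvNewRow]
        · rw [hX, hdp, hc]
          show (pvNewRow (pvDpLoop pre n c') pre n).getD n 0 ≤ 0
          rw [pvNewRow_getD _ _ n n (by omega) (le_refl _)]
          have h1 := innerMin_le (pvDpLoop pre n c') pre (show 0 < n by omega)
          have h2 : pvCand (pvDpLoop pre n c') pre n 0 ≤ 0 := by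
            unfold pvCand
            rw [hpre']
            rw [show pvDpLoop pre n c' = pvDpLoop (pvPrefix boards) boards.length c' by rw [hpre', hn]]
            rw [dpLoop_getD0 boards c']
            rw [pvPrefix_getD boards n (le_refl _), pvPrefix_getD boards 0 (by omega)]
            rw [List.take_length]
            simp
            omega
          omega
    rw [if_neg (by omega : ¬ (-1:Int) > 0), if_pos hXle]
  · -- total ≥ 1: the nonneg branch of Pre_ holds
    push_neg at hs
    have hs1 : 1 ≤ boards.sum := by omega
    rcases hpre with ⟨h0, hm⟩ | hss
    · have hb : boards ≠ [] := by
        intro h; subst h; simp at hs1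
      have hn1 : 1 ≤ boards.length := List.length_pos_of_ne_nil hb
      -- the DP row and its meaning
      have hrow : PRowOK boards (iters + 1) dp := by
        rw [hdp, hpre', hn]; exact prow_rows boards h0 iters
      obtain ⟨hlb, hach⟩ := by
        have h := hrow n (by omega) (le_refl _)
        rw [show boards.take n = boards by rw [hn, List.take_length]] at h
        exact h
      -- X is the optimum; characterize feasibility
      have hchar : ∀ L, partition_possible boards k L = true ↔ X ≤ L := by
        by_cases hk1 : k ≤ 1
        · have hiters0 : iters = 0 := by
            rw [hiters]
            have : min k (n : Int) ≤ 1 := le_trans (min_le_left _ _) hk1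
            omega
          have hXv : X = costOf boards := by
            rw [hX, hdp, hiters0]
            show pre.getD n 0 = costOf boards
            rw [hpre', pvPrefix_getD boards n (le_refl _), List.take_length,
              costOf_eq_sum hb h0]
          intro L
          rw [hXv]
          exact char_k_le_one hb hk1 L
        · push_neg at hk1
          have hmin1 : (1:Int) ≤ min k (n:Int) := by
            simp only [le_min_iff]
            omega
          have hitersv : (iters : Int) + 1 = min k (n : Int) := by
            rw [hiters]
            omega
          intro L
          rw [char_nonneg hb h0 (by omega) L]
          constructor
          · rintro ⟨P, hP, hPk, hPpc⟩
            have hPn : P.length ≤ boards.length := parts_length_le hP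
            have hPb : P.length ≤ iters + 1 := by
              have : (P.length : Int) ≤ min k (n:Int) := by
                simp only [le_min_iff]
                constructor
                · exact hPk
                · rw [hn]; exact_mod_cast hPn
              omega
            exact le_trans (hlb P hP hPb) hPpc
          · intro hXL
            obtain ⟨P, hP, hP1, hPB, hPpc⟩ := hach
            refine ⟨P, hP, ?_, by rw [hPpc]; exact hXL⟩
            have : (P.length : Int) ≤ (iters : Int) + 1 := by exact_mod_cast hPB
            omega
      -- bounds on X
      have hXsum : X ≤ boards.sum := by
        rw [hX, hn]
        exact prow_le_sum boards h0 hb (B := iters + 1) (by omega) hrow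
      have hX1 : 1 ≤ X := by
        by_contra hcon
        push_neg at hcon
        obtain ⟨P, hP, hP1, hPB, hPpc⟩ := hach
        have hall : ∀ part ∈ P, part.sum = 0 := by
          intro part hp
          have h1 : costOf part ≤ pcost P := mem_le_pcost hp
          have h2 : costOf part = part.sum := costOf_eq_sum (hP.2 part hp)
            (fun x hx => h0 x (by rw [← hP.1]; exact List.mem_flatten.2 ⟨part, hp, hx⟩))
          have h3 : (0:Int) ≤ part.sum := List.sum_nonneg
            (fun x hx => h0 x (by rw [← hP.1]; exact List.mem_flatten.2 ⟨part, hp, hx⟩))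
          omega
        have hsum0 : boards.sum = 0 := by
          rw [← hP.1, List.sum_flatten]
          have : P.map List.sum = P.map (fun _ => (0:Int)) := by
            exact List.map_congr_left (fun part hp => hall part hp)
          rw [this]
          simp
        omega
      -- finish
      rw [bsLoop_eval hchar 1 boards.sum (-1)]
      rw [max_eq_left hX1, if_pos hXsum, if_pos (by omega : X > 0), if_neg (by omega : ¬ X ≤ 0)]
    · omega
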